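-- pv_equiv track=rewrite | github.com/Cambricon/mlu-ops | test/mlu_op_gtest/tools/gtest_style.py | check_context
-- ===== SOURCE A (Python) =====
-- def check_context(line):
--     context = ""
--     if line.find("//") != -1:
--         context = line[0:line.find("//")]  # get words before //
--     seg = line.split("\"")   # get word not in ""
--     for i in range(0, len(seg)):
--         if i%2 == 0:
--             context += seg[i]
--     return context
-- ===== SOURCE B (Python) =====
-- def check_context(line):
--     idx = line.find("//")
--     prefix = line[:idx] if idx != -1 else ""
--     out = []
--     inside = False
--     for c in line:
--         if c == '"':
--             inside = not inside
--         elif not inside: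
--             out.append(c)
--     return prefix + "".join(out)
-- ===== Notes on version B (the rewrite author's own statement) =====
-- stated objective: alternative
-- what changed: Replaces the split-on-quote plus even-index range loop with a single character scan that maintains an inside-quotes boolean flag and collects characters outside quotes.
import Mathlib
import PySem

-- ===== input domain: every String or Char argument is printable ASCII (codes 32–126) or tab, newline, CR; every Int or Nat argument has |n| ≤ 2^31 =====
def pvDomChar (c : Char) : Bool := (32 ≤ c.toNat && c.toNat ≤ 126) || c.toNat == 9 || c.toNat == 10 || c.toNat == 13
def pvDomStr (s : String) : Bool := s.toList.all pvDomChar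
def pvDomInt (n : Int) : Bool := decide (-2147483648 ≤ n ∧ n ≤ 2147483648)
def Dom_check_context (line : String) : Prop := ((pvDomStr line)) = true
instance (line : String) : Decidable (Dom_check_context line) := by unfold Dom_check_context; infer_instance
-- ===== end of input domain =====

-- B replaces A's split('"')-and-even-index loop by one character scan with an inside-quotes flag; same result, no speed claim.

-- ===== PORT A =====
def check_context (line : String) : String :=
  let cs := line.toList
  let context : List Char :=
    if PySem.Chars.find cs "//".toList ≠ -1 then
      PySem.Chars.slice cs (some 0) (some (PySem.Chars.find cs "//".toList))
    else []
  let seg := PySem.Chars.splitOn cs ['"']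
  let out := (PySem.List.pyRange 0 (seg.length : Int) 1).foldl
    (fun ctx i => if PySem.Int.mod i 2 = 0 then ctx ++ PySem.List.pyGetD seg i [] else ctx) context
  String.ofList out

-- ===== PORT B =====
def check_context_alt (line : String) : String :=
  let cs := line.toList
  let idx := PySem.Chars.find cs "//".toList
  let pre : List Char := if idx ≠ -1 then PySem.Chars.slice cs none (some idx) else []
  let st := cs.foldl
    (fun (st : Bool × List Char) c =>
      if c = '"' then (!st.1, st.2)
      else if st.1 then st
      else (st.1, st.2 ++ [c])) (false, [])
  String.ofList (pre ++ st.2)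

-- ===== PRECONDITION & SPEC =====
def Spec_check_context (line : String) (out : String) : Prop := out = check_context_alt line
instance (line : String) (out : String) : Decidable (Spec_check_context line out) := by unfold Spec_check_context; infer_instance

-- ===== CLAIM (what is proved, stated in full; the proofs are below) =====
def Claim_equal_check_context : Prop := ∀ (line : String), Dom_check_context line → Spec_check_context line (check_context line)

-- ===== LEMMAS AND PROOFS =====

-- pure form of splitOn's fuelled accumulator recursion, specialised to the separator ['"']
def pvSegs : List Char → List Char → List (List Char)
  | cur, [] => [cur.reverse]
  | cur, c :: t => if c = '"' then cur.reverse :: pvSegs [] t else pvSegs (c :: cur) t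

-- concatenation of the segments at alternating positions (b = true: current position is even)
def pvJoinAlt : Bool → List (List Char) → List Char
  | _, [] => []
  | true, a :: t => a ++ pvJoinAlt false t
  | false, _ :: t => pvJoinAlt true t

-- B's scan as a front-consuming recursion (inside = quote-state flag)
def pvScan : Bool → List Char → List Char
  | _, [] => []
  | inside, c :: t => if c = '"' then pvScan (!inside) t else if inside then pvScan inside t else c :: pvScan inside t

theorem pvGo_spec (l : List Char) : ∀ (fuel : Nat) (cur : List Char) (acc : List (List Char)),
    l.length < fuel →
    PySem.Chars.splitOn.go ['"'] fuel l cur acc = acc.reverse ++ pvSegs cur l := by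
  induction l with
  | nil =>
    intro fuel cur acc h
    match fuel with
    | fuel + 1 =>
      rw [PySem.Chars.splitOn.go] <;> try omega
      simp [pvSegs]
  | cons c t ih =>
    intro fuel cur acc h
    match fuel with
    | fuel + 1 =>
      by_cases hc : c = '"'
      · subst hc
        rw [PySem.Chars.splitOn.go]
        simp only [List.isPrefixOf, beq_self_eq_true, Bool.true_and, List.isPrefixOf_nil_left,
          if_true, List.length_cons, List.drop_succ_cons, List.length_nil, List.drop_zero]
        rw [ih fuel [] (cur.reverse :: acc) (by simpa using Nat.lt_of_succ_lt_succ h)]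
        simp [pvSegs]
      · rw [PySem.Chars.splitOn.go]
        simp only [List.isPrefixOf, List.isPrefixOf_nil_left, Bool.and_true]
        rw [if_neg (by simpa using fun h' => hc h'.symm)]
        rw [ih fuel (c :: cur) acc (by simpa using Nat.lt_of_succ_lt_succ h)]
        simp [pvSegs, hc]

theorem pvSplitOn_quote (l : List Char) : PySem.Chars.splitOn l ['"'] = pvSegs [] l := by
  rw [PySem.Chars.splitOn, pvGo_spec l (l.length + 1) [] [] (Nat.lt_succ_self _)]
  simp

theorem pvSegs_join (l : List Char) : ∀ cur,
    pvJoinAlt true (pvSegs cur l) = cur.reverse ++ pvScan false l ∧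
    pvJoinAlt false (pvSegs cur l) = pvScan true l := by
  induction l with
  | nil => intro cur; simp [pvSegs, pvJoinAlt, pvScan]
  | cons c t ih =>
    intro cur
    by_cases hc : c = '"'
    · subst hc
      simp [pvSegs, pvJoinAlt, pvScan, (ih []).1, (ih []).2]
    · simp [pvSegs, pvScan, hc, (ih (c :: cur)).1, (ih (c :: cur)).2]

theorem pvJoinAlt_append_single (x : List Char) (xs : List (List Char)) :
    pvJoinAlt true (xs ++ [x]) = pvJoinAlt true xs ++ (if xs.length % 2 = 0 then x else []) ∧
    pvJoinAlt false (xs ++ [x]) = pvJoinAlt false xs ++ (if xs.length % 2 = 1 then x else []) := by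
  induction xs with
  | nil => simp [pvJoinAlt]
  | cons a t ih =>
    constructor
    · simp only [List.cons_append, pvJoinAlt, ih.2, List.length_cons, List.append_assoc]
      congr 1
      congr 1
      split_ifs with h1 h2 h2 <;> first | rfl | omega
    · simp only [List.cons_append, pvJoinAlt, ih.1, List.length_cons]
      congr 1
      split_ifs with h1 h2 h2 <;> first | rfl | omega

theorem pvFoldA (seg : List (List Char)) (init : List Char) :
    (List.range seg.length).foldl
      (fun ctx i => if i % 2 = 0 then ctx ++ seg.getD i [] else ctx) init
    = init ++ pvJoinAlt true seg := by
  induction seg using List.reverseRecOn with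
  | nil => simp [pvJoinAlt]
  | append_singleton xs x ih =>
    rw [List.length_append, List.length_singleton, List.range_succ, List.foldl_append]
    rw [PySem.List.foldl_congr_mem (List.range xs.length)
      (fun ctx i => if i % 2 = 0 then ctx ++ (xs ++ [x]).getD i [] else ctx)
      (fun ctx i => if i % 2 = 0 then ctx ++ xs.getD i [] else ctx) init
      (by
        intro acc i hi
        have hlt : i < xs.length := List.mem_range.mp hi
        by_cases hp : i % 2 = 0
        · simp [hp, List.getD, List.getElem?_append_left hlt]
        · simp [hp])]
    rw [ih, (pvJoinAlt_append_single x xs).1]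
    by_cases hp : xs.length % 2 = 0
    · simp [hp, List.getD]
    · simp [hp]

theorem pvFoldB (l : List Char) : ∀ (inside : Bool) (acc : List Char),
    (l.foldl (fun (st : Bool × List Char) c =>
      if c = '"' then (!st.1, st.2)
      else if st.1 then st
      else (st.1, st.2 ++ [c])) (inside, acc)).2 = acc ++ pvScan inside l := by
  induction l with
  | nil => intro inside acc; simp [pvScan]
  | cons c t ih =>
    intro inside acc
    by_cases hc : c = '"'
    · subst hc; simp [pvScan, ih]
    · cases inside <;> simp [pvScan, hc, ih]

theorem pvModCast (k : Nat) : PySem.Int.mod (k : Int) 2 = ((k % 2 : Nat) : Int) := by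
  exact_mod_cast PySem.Int.mod_natCast k 2

-- ===== VERDICT (by name: the statement is the Claim_ definition above) =====
theorem check_context_spec : Claim_equal_check_context := by
  intro line _
  unfold Spec_check_context check_context check_context_alt
  simp only [PySem.Chars.slice_eq_listSlice]
  rw [show PySem.List.slice line.toList (some 0) (some (PySem.Chars.find line.toList "//".toList))
      = PySem.List.slice line.toList none (some (PySem.Chars.find line.toList "//".toList)) from by
    simp [PySem.List.slice]]
  congr 1
  rw [PySem.List.pyRange_zero_natCast, List.foldl_map]
  rw [PySem.List.foldl_congr_mem
    (List.range (PySem.Chars.splitOn line.toList ['"']).length)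
    (fun ctx (i : Nat) => if PySem.Int.mod (i : Int) 2 = 0 then ctx ++ PySem.List.pyGetD (PySem.Chars.splitOn line.toList ['"']) (i : Int) [] else ctx)
    (fun ctx i => if i % 2 = 0 then ctx ++ (PySem.Chars.splitOn line.toList ['"']).getD i [] else ctx) _
    (by
      intro acc i _
      simp only [pvModCast, PySem.List.pyGetD_natCast]
      by_cases hp : i % 2 = 0
      · simp [hp]
      · have h2 : ((i % 2 : Nat) : Int) ≠ 0 := by exact_mod_cast hp
        simp only [if_neg h2, if_neg hp])]
  rw [pvFoldA, pvSplitOn_quote, (pvSegs_join line.toList []).1, pvFoldB]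
  simp
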